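-- pv_equiv track=rewrite | github.com/Alejj4/ProyectoProgramacion1 | modulos/autos.py | contar_modelos_disponibles
-- ===== SOURCE A (Python) =====
-- def contar_modelos_disponibles(modelos, i=0):
--     #funcion recursiva
--     if i==len(modelos):
--         return 0
--     stock = modelos[i].get("stock", 0)
--     subtotal=contar_modelos_disponibles(modelos, i + 1)
--     if stock>0:
--         return 1+subtotal
--     else:
--         return subtotal
-- ===== SOURCE B (Python) =====
-- def contar_modelos_disponibles(modelos, i=0):
--     # iterative single pass from index i instead of linear recursion
--     total = 0
--     for j in range(i, len(modelos)):
--         if modelos[j].get("stock", 0) > 0: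
--             total += 1
--     return total
-- ===== Notes on version B (the rewrite author's own statement) =====
-- stated objective: simpler
-- what changed: Replaces the linear recursion building the count through the call stack with a single iterative for-loop over range(i, len(modelos)) accumulating a counter.
import Mathlib
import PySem

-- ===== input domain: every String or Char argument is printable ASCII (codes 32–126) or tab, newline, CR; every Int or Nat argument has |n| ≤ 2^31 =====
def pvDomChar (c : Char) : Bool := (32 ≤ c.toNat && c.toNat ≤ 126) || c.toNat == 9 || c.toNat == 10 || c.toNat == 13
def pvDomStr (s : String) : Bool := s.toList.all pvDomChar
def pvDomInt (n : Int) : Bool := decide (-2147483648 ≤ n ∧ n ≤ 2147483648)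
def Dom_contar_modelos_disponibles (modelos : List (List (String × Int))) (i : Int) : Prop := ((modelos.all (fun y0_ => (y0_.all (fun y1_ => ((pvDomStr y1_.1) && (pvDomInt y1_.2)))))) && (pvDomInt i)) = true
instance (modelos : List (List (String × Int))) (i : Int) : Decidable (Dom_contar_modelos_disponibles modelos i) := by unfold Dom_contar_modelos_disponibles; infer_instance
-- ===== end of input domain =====

-- B replaces A's linear recursion with a single iterative counting loop (simpler: O(1) space instead of O(n) call stack).


-- shared transliteration of Python's d.get("stock", 0) on an association list (first match)
def stockGetD (m : List (String × Int)) : Int :=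
  match m.find? (fun p => p.1 == "stock") with
  | some p => p.2
  | none => 0

-- ===== PORT A =====
-- A's recursion is not structural in i; fuel (len - i).toNat bounds the recursion depth,
-- which suffices on every input inside Pre_ (where Python A returns).
def contarAuxA (modelos : List (List (String × Int))) : Nat → Int → Int
  | 0, _ => 0
  | fuel + 1, i =>
    if i = (modelos.length : Int) then 0
    else
      -- modelos[i] (IndexError = none, excluded by Pre_)
      let stock : Int := match PySem.List.pyGet? modelos i with
        | some m => stockGetD m
        | none => 0
      let subtotal := contarAuxA modelos fuel (i + 1)
      if stock > 0 then 1 + subtotal else subtotal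

def contar_modelos_disponibles (modelos : List (List (String × Int))) (i : Int) : Int :=
  contarAuxA modelos ((modelos.length : Int) - i).toNat i

-- ===== PORT B =====
def contar_modelos_disponibles_alt (modelos : List (List (String × Int))) (i : Int) : Int :=
  (PySem.List.pyRange i (modelos.length : Int) 1).foldl
    (fun total j =>
      if (match PySem.List.pyGet? modelos j with
          | some m => stockGetD m
          | none => 0) > 0
      then total + 1 else total) 0

-- ===== PRECONDITION & SPEC =====
-- Pre_ excludes exactly the inputs where Python A raises IndexError: i > len(modelos)
-- (modelos[i] out of range at the first call) and i < -len(modelos) (negative index out of range).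
def Pre_contar_modelos_disponibles (modelos : List (List (String × Int))) (i : Int) : Prop :=
  -(modelos.length : Int) ≤ i ∧ i ≤ (modelos.length : Int)
instance (modelos : List (List (String × Int))) (i : Int) : Decidable (Pre_contar_modelos_disponibles modelos i) := by unfold Pre_contar_modelos_disponibles; infer_instance

def pvWitness_contar_modelos_disponibles : (List (List (String × Int))) × Int :=
  ([[("stock", 2)], [("stock", 0)], [("color", 1)]], -1)

def Spec_contar_modelos_disponibles (modelos : List (List (String × Int))) (i : Int) (out : Int) : Prop := out = contar_modelos_disponibles_alt modelos i
instance (modelos : List (List (String × Int))) (i : Int) (out : Int) : Decidable (Spec_contar_modelos_disponibles modelos i out) := by unfold Spec_contar_modelos_disponibles; infer_instance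

-- ===== CLAIM (what is proved, stated in full; the proofs are below) =====
def Claim_equal_contar_modelos_disponibles : Prop := ∀ (modelos : List (List (String × Int))) (i : Int), Dom_contar_modelos_disponibles modelos i → Pre_contar_modelos_disponibles modelos i → Spec_contar_modelos_disponibles modelos i (contar_modelos_disponibles modelos i)

-- ===== LEMMAS AND PROOFS =====

-- shifting the accumulator out of B's counting foldl
lemma foldl_count_shift (P : Int → Prop) [DecidablePred P] :
    ∀ (l : List Int) (a : Int),
      l.foldl (fun total j => if P j then total + 1 else total) a
        = a + l.foldl (fun total j => if P j then total + 1 else total) 0 := by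
  intro l
  induction l with
  | nil => intro a; simp
  | cons x xs ih =>
    intro a
    simp only [List.foldl_cons]
    by_cases h : P x
    · simp [h, ih (a + 1), ih 1]; ring
    · simp [h, ih a]

lemma contarAux_eq_foldl (modelos : List (List (String × Int))) :
    ∀ (fuel : Nat) (i : Int),
      -(modelos.length : Int) ≤ i → i ≤ (modelos.length : Int) →
      ((modelos.length : Int) - i).toNat ≤ fuel →
      contarAuxA modelos fuel i = contar_modelos_disponibles_alt modelos i := by
  intro fuel
  induction fuel with
  | zero =>
    intro i h1 h2 hf
    have : i = (modelos.length : Int) := by omega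
    subst this
    simp [contarAuxA, contar_modelos_disponibles_alt, PySem.List.pyRange_one_eq_nil le_rfl]
  | succ f ih =>
    intro i h1 h2 hf
    by_cases hi : i = (modelos.length : Int)
    · subst hi
      simp [contarAuxA, contar_modelos_disponibles_alt, PySem.List.pyRange_one_eq_nil le_rfl]
    · have hlt : i < (modelos.length : Int) := lt_of_le_of_ne h2 hi
      have hrec := ih (i + 1) (by omega) (by omega) (by omega)
      simp only [contarAuxA, if_neg hi]
      rw [contar_modelos_disponibles_alt, PySem.List.pyRange_one_cons hlt]
      simp only [List.foldl_cons]
      rw [foldl_count_shift]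
      have halt : (PySem.List.pyRange (i + 1) (modelos.length : Int) 1).foldl
          (fun total j =>
            if (match PySem.List.pyGet? modelos j with
                | some m => stockGetD m
                | none => 0) > 0
            then total + 1 else total) 0 = contarAuxA modelos f (i + 1) := hrec.symm
      rw [halt]
      split <;> omega

-- ===== VERDICT (by name: the statement is the Claim_ definition above) =====
theorem contar_modelos_disponibles_spec : Claim_equal_contar_modelos_disponibles := by
  intro modelos i _ hpre
  unfold Spec_contar_modelos_disponibles contar_modelos_disponibles
  exact contarAux_eq_foldl modelos _ i hpre.1 hpre.2 le_rfl
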